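-- pv_equiv track=rewrite | github.com/Jennivine/ProgComp | Revelation/revelation.py | typeA
-- ===== SOURCE A (Python) =====
-- def typeA(n):
-- 	bs = format(n, 'b')
-- 	newString = ""
-- 	for digit in bs:
-- 		if digit == '0':
-- 			newString += '1'
-- 		elif digit == '1':
-- 			newString += '0'
--
-- 	return newString[::-1] == bs
-- ===== SOURCE B (Python) =====
-- def typeA(n):
--     # n's binary string equals the reversal of its bitwise complement
--     # iff n + reverse_bits(n) is all ones over n's bit length.
--     # Negatives never match (the '-' sign is dropped from the complement,
--     # so lengths differ) and 0 ("0") fails on its single bit.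
--     if n <= 0:
--         return False
--     L = n.bit_length()
--     r = 0
--     m = n
--     for _ in range(L):
--         r = 2 * r + m % 2
--         m //= 2
--     return n + r == (1 << L) - 1
-- ===== Notes on version B (the rewrite author's own statement) =====
-- stated objective: alternative
-- what changed: B does no string work at all: it uses the arithmetic identity that the binary string equals the reversal of its bitwise complement iff n plus its bit-reversal is an all-ones pattern over its bit length, computing the bit-reversal with an integer halving loop; non-positive n is rejected up front because A's check can never succeed there.
import Mathlib
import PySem

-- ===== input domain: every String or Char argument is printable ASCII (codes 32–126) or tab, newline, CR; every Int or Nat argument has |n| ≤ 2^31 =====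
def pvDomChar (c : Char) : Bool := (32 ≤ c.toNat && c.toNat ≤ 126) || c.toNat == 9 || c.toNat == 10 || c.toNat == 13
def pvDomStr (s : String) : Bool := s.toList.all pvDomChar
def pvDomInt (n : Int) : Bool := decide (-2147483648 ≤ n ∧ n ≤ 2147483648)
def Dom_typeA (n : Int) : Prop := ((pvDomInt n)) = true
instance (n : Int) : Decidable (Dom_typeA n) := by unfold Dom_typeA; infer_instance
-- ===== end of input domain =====

-- B replaces all string work by integer arithmetic: the binary string equals the reversal
-- of its bitwise complement iff n plus its bit-reversal is all ones over its bit length.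

-- ===== PORT A =====
-- format(n,'b') has no PySem primitive: ported by hand, exact (binary digits, '-' sign for n<0).
def toBinNat (n : Nat) : List Char :=
  if n < 2 then [if n = 1 then '1' else '0']
  else toBinNat (n / 2) ++ [if n % 2 = 1 then '1' else '0']
termination_by n
decreasing_by omega

def pyFormatB (n : Int) : List Char :=
  if n < 0 then '-' :: toBinNat (-n).toNat else toBinNat n.toNat

def typeA (n : Int) : Bool :=
  let bs := pyFormatB n
  let newString := bs.foldl
    (fun acc d => if d = '0' then acc ++ ['1'] else if d = '1' then acc ++ ['0'] else acc) []
  newString.reverse == bs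

-- ===== PORT B =====
-- the 'for _ in range(L)' loop of Source B: one step is r = 2*r + m % 2; m //= 2
def revStep : Nat → Int → Int → Int × Int
  | 0, m, r => (m, r)
  | k+1, m, r => revStep k (PySem.Int.floordiv m 2) (2 * r + PySem.Int.mod m 2)

def typeA_alt (n : Int) : Bool :=
  if n ≤ 0 then false
  else
    let L := PySem.Int.bitLength n
    let p := revStep L n 0
    n + p.2 == (1 : Int) <<< L - 1

-- ===== PRECONDITION & SPEC =====
def Spec_typeA (n : Int) (out : Bool) : Prop := out = typeA_alt n
instance (n : Int) (out : Bool) : Decidable (Spec_typeA n out) := by unfold Spec_typeA; infer_instance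

-- ===== CLAIM (what is proved, stated in full; the proofs are below) =====
def Claim_equal_typeA : Prop := ∀ (n : Int), Dom_typeA n → Spec_typeA n (typeA n)

-- ===== LEMMAS AND PROOFS =====

-- ---- A-side normal form ----
def pvG (c : Char) : Option Char :=
  if c = '0' then some '1' else if c = '1' then some '0' else none

theorem foldl_eq_filterMap (bs : List Char) (acc : List Char) :
    bs.foldl
      (fun acc d => if d = '0' then acc ++ ['1'] else if d = '1' then acc ++ ['0'] else acc) acc
      = acc ++ bs.filterMap pvG := by
  induction bs generalizing acc with
  | nil => simp
  | cons d t ih =>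
    rw [List.foldl_cons, List.filterMap_cons, ih]
    by_cases h0 : d = '0'
    · simp [h0, pvG]
    · by_cases h1 : d = '1' <;> simp [pvG, h0, h1]

theorem toBin_digits (n : Nat) : ∀ c ∈ toBinNat n, c = '0' ∨ c = '1' := by
  induction n using toBinNat.induct with
  | case1 n h =>
    rw [toBinNat, if_pos h]; intro c hc
    simp at hc; subst hc; split_ifs <;> simp
  | case2 n h ih =>
    rw [toBinNat, if_neg h]; intro c hc
    rcases List.mem_append.mp hc with h1 | h1
    · exact ih c h1
    · simp at h1; subst h1; split_ifs <;> simp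

def pvFlip (c : Char) : Char := if c = '0' then '1' else '0'

theorem filterMap_eq_map_flip (bs : List Char) (hd : ∀ c ∈ bs, c = '0' ∨ c = '1') :
    bs.filterMap pvG = bs.map pvFlip := by
  induction bs with
  | nil => simp
  | cons d t ih =>
    have := hd d (by simp)
    rw [List.filterMap_cons, List.map_cons, ih (fun c hc => hd c (by simp [hc]))]
    rcases this with h | h <;> subst h <;> simp [pvG, pvFlip]

-- ---- binary value of a digit list ----
def pvBit (c : Char) : Nat := if c = '1' then 1 else 0
def pvVal (ds : List Char) : Nat := ds.foldl (fun a c => 2 * a + pvBit c) 0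

theorem pvVal_aux (ds : List Char) : ∀ a : Nat,
    ds.foldl (fun a c => 2 * a + pvBit c) a = a * 2 ^ ds.length + pvVal ds := by
  induction ds with
  | nil => intro a; simp [pvVal]
  | cons c t ih =>
    intro a
    have h1 := ih (2 * a + pvBit c)
    have h2 := ih (pvBit c)
    simp only [List.foldl_cons, List.length_cons, pvVal, Nat.mul_zero, Nat.zero_add] at *
    rw [h1, h2]; ring

theorem pvVal_cons (c : Char) (t : List Char) :
    pvVal (c :: t) = pvBit c * 2 ^ t.length + pvVal t := by
  have := pvVal_aux t (pvBit c)
  simp only [pvVal, List.foldl_cons]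
  simpa using this

theorem pvVal_append (ds : List Char) (c : Char) :
    pvVal (ds ++ [c]) = 2 * pvVal ds + pvBit c := by
  simp [pvVal, List.foldl_append]

theorem pvBit_le_one (c : Char) : pvBit c ≤ 1 := by
  unfold pvBit; split_ifs <;> omega

theorem pvVal_lt (ds : List Char) : pvVal ds < 2 ^ ds.length := by
  induction ds with
  | nil => simp [pvVal]
  | cons c t ih =>
    rw [pvVal_cons]
    have h1 : pvBit c * 2 ^ t.length ≤ 1 * 2 ^ t.length :=
      Nat.mul_le_mul_right _ (pvBit_le_one c)
    simp only [List.length_cons, pow_succ]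
    omega

theorem pvVal_toBin (n : Nat) : pvVal (toBinNat n) = n := by
  induction n using toBinNat.induct with
  | case1 n h =>
    rw [toBinNat, if_pos h]
    interval_cases n <;> simp [pvVal, pvBit]
  | case2 n h ih =>
    rw [toBinNat, if_neg h, pvVal_append, ih]
    split_ifs with hp <;> simp [pvBit] <;> omega

theorem pvVal_inj (ds : List Char) : ∀ es : List Char,
    (∀ c ∈ ds, c = '0' ∨ c = '1') → (∀ c ∈ es, c = '0' ∨ c = '1') →
    ds.length = es.length → pvVal ds = pvVal es → ds = es := by
  induction ds with
  | nil =>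
    intro es _ _ hl _
    cases es with
    | nil => rfl
    | cons a b => simp at hl
  | cons c t ih =>
    intro es hd he hl hv
    cases es with
    | nil => simp at hl
    | cons c' t' =>
      have hlt : t.length = t'.length := by simpa using hl
      rw [pvVal_cons, pvVal_cons, hlt] at hv
      have h1 : pvVal t < 2 ^ t'.length := hlt ▸ pvVal_lt t
      have h2 : pvVal t' < 2 ^ t'.length := pvVal_lt t'
      have hb1 := pvBit_le_one c
      have hb2 := pvBit_le_one c'
      have hb1' : pvBit c = 0 ∨ pvBit c = 1 := by omega
      have hb2' : pvBit c' = 0 ∨ pvBit c' = 1 := by omega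
      have hbe : pvBit c = pvBit c' ∧ pvVal t = pvVal t' := by
        rcases hb1' with h | h <;> rcases hb2' with h' | h' <;>
          rw [h, h'] at hv <;> constructor <;> omega
      have hc : c = c' := by
        rcases hd c (by simp) with h | h <;> rcases he c' (by simp) with h' | h' <;>
          simp [h, h', pvBit] at hbe ⊢
      rw [hc, ih t' (fun x hx => hd x (by simp [hx])) (fun x hx => he x (by simp [hx])) hlt hbe.2]

theorem pvVal_flip (ds : List Char) (hd : ∀ c ∈ ds, c = '0' ∨ c = '1') :
    pvVal (ds.map pvFlip) + pvVal ds + 1 = 2 ^ ds.length := by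
  induction ds with
  | nil => simp [pvVal]
  | cons c t ih =>
    have hc : pvBit (pvFlip c) + pvBit c = 1 := by
      rcases hd c (by simp) with h | h <;> simp [h, pvFlip, pvBit]
    have := ih (fun x hx => hd x (by simp [hx]))
    rw [List.map_cons, pvVal_cons, pvVal_cons]
    simp only [List.length_map, List.length_cons, pow_succ]
    nlinarith

-- ---- the bit-reversal loop ----
def revN : Nat → Nat → Nat → Nat × Nat
  | 0, m, r => (m, r)
  | k+1, m, r => revN k (m / 2) (2 * r + m % 2)

theorem revStep_cast (k : Nat) : ∀ m r : Nat,
    revStep k (m : Int) (r : Int) = (((revN k m r).1 : Int), ((revN k m r).2 : Int)) := by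
  induction k with
  | zero => intro m r; rfl
  | succ k ih =>
    intro m r
    have hd : PySem.Int.floordiv (m : Int) 2 = ((m / 2 : Nat) : Int) := by
      exact_mod_cast PySem.Int.floordiv_natCast m 2
    have hm : PySem.Int.mod (m : Int) 2 = ((m % 2 : Nat) : Int) := by
      exact_mod_cast PySem.Int.mod_natCast m 2
    rw [revStep, hd, hm, show 2 * (r : Int) + ((m % 2 : Nat) : Int) = ((2 * r + m % 2 : Nat) : Int) by push_cast; ring]
    rw [ih]; rfl

theorem revN_spec (ds : List Char) : ∀ r : Nat,
    revN ds.length (pvVal ds) r = (0, r * 2 ^ ds.length + pvVal ds.reverse) := by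
  induction ds using List.reverseRecOn with
  | nil => intro r; simp [pvVal, revN]
  | append_singleton ds c ih =>
    intro r
    have hb := pvBit_le_one c
    have hdiv : (2 * pvVal ds + pvBit c) / 2 = pvVal ds := by omega
    have hmod : (2 * pvVal ds + pvBit c) % 2 = pvBit c := by omega
    rw [List.length_append, List.length_cons, List.length_nil, pvVal_append, revN, hdiv, hmod,
      ih (2 * r + pvBit c), List.reverse_append]
    simp only [List.reverse_cons, List.reverse_nil, List.nil_append, List.cons_append,
      List.nil_append, pvVal_cons, List.length_reverse]
    simp only [Prod.mk.injEq, true_and]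
    ring

-- ---- length of format(n,'b') vs bit_length ----
theorem len_toBin_bitLength (n : Nat) (h : n ≠ 0) :
    (toBinNat n).length = PySem.Int.bitLength (n : Int) := by
  induction n using toBinNat.induct with
  | case1 n hlt =>
    rw [toBinNat, if_pos hlt]
    have : n = 1 := by omega
    subst this; decide
  | case2 n hlt ih =>
    rw [toBinNat, if_neg hlt, PySem.Int.bitLength_natCast (m := n) (by omega)]
    have h2 : n / 2 ≠ 0 := by omega
    simp [ih h2]

-- ---- negative branch: A's complement drops the '-', lengths never match ----
theorem typeA_neg (n : Int) (h : n < 0) : typeA n = false := by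
  unfold typeA
  have hbs : pyFormatB n = '-' :: toBinNat (-n).toNat := by rw [pyFormatB, if_pos h]
  simp only [hbs, foldl_eq_filterMap, List.nil_append]
  have hG : List.filterMap pvG ('-' :: toBinNat (-n).toNat)
      = List.filterMap pvG (toBinNat (-n).toNat) := by simp [pvG]
  rw [hG]
  apply beq_eq_false_iff_ne.mpr
  intro heq
  have := congrArg List.length heq
  have hle : (List.filterMap pvG (toBinNat (-n).toNat)).length ≤ (toBinNat (-n).toNat).length :=
    List.length_filterMap_le _ _
  simp only [List.length_reverse, List.length_cons] at this
  omega

-- ===== VERDICT (by name: the statement is the Claim_ definition above) =====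
theorem typeA_spec : Claim_equal_typeA := by
  intro n _
  unfold Spec_typeA
  rcases lt_trichotomy n 0 with h | h | h
  · rw [typeA_neg n h, typeA_alt, if_pos (le_of_lt h)]
  · subst h
    have h0 : toBinNat 0 = ['0'] := by rw [toBinNat]; rfl
    rw [typeA_alt, if_pos le_rfl]
    unfold typeA
    rw [show pyFormatB 0 = ['0'] from by rw [pyFormatB]; simp [h0]]
    simp
  · -- n > 0
    have hn0 : n.toNat ≠ 0 := by omega
    set ds := toBinNat n.toNat with hds
    have hbits := toBin_digits n.toNat
    have hval : pvVal ds = n.toNat := pvVal_toBin n.toNat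
    have hlen : ds.length = PySem.Int.bitLength n := by
      rw [← hds] at *
      have := len_toBin_bitLength n.toNat hn0
      rwa [Int.toNat_of_nonneg (by omega)] at this
    -- A side
    have hA : typeA n = ((ds.map pvFlip).reverse == ds) := by
      simp only [typeA]
      rw [show pyFormatB n = ds from by rw [pyFormatB, if_neg (by omega)]]
      rw [foldl_eq_filterMap, List.nil_append, filterMap_eq_map_flip ds hbits]
    -- B side
    have hcast : n = ((n.toNat : Nat) : Int) := by omega
    have hrevN : revN (PySem.Int.bitLength n) n.toNat 0 = (0, pvVal ds.reverse) := by
      rw [← hlen, ← hval, revN_spec ds 0]; simp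
    have hrev : revStep (PySem.Int.bitLength n) n 0 = ((0 : Int), ((pvVal ds.reverse : Nat) : Int)) := by
      have h1 := revStep_cast (PySem.Int.bitLength n) n.toNat 0
      rw [hrevN, ← hcast] at h1
      simpa using h1
    have hB : typeA_alt n
        = ((n : Int) + ((pvVal ds.reverse : Nat) : Int) == (1 : Int) <<< PySem.Int.bitLength n - 1) := by
      simp only [typeA_alt, if_neg (show ¬ n ≤ 0 by omega)]
      rw [hrev]
    rw [hA, hB, Bool.eq_iff_iff]
    simp only [beq_iff_eq]
    have hshift : ((1 : Int) <<< PySem.Int.bitLength n) = ((2 ^ ds.length : Nat) : Int) := by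
      rw [hlen]; push_cast [Int.shiftLeft_eq]; ring
    have hlt1 : pvVal ds < 2 ^ ds.length := pvVal_lt ds
    have hflip := pvVal_flip ds hbits
    rw [hshift]
    constructor
    · intro heq
      have h2 : ds.map pvFlip = ds.reverse := by
        have hc := congrArg List.reverse heq
        simpa using hc
      have hmapval : pvVal (ds.map pvFlip) = pvVal ds.reverse := by rw [h2]
      omega
    · intro heq
      have hsum : n.toNat + pvVal ds.reverse + 1 = 2 ^ ds.length := by omega
      have hmapval : pvVal (ds.map pvFlip) = pvVal ds.reverse := by omega
      have h2 : ds.map pvFlip = ds.reverse := by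
        apply pvVal_inj
        · intro c hc
          rcases List.mem_map.mp hc with ⟨x, _, hx⟩
          rw [← hx]; unfold pvFlip; split_ifs <;> simp
        · intro c hc; exact hbits c (List.mem_reverse.mp hc)
        · simp
        · exact hmapval
      rw [h2, List.reverse_reverse]
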